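-- pv_equiv track=rewrite | github.com/Oseongmin614/Algorithm_python | 0408/age_of_exoplanets.py | solution
-- ===== SOURCE A (Python) =====
-- def solution(age):
--     answer = ''
--     age_d = {0: 'a', 1: 'b', 2: 'c', 3: 'd', 4: 'e', 5: 'f', 6: 'g', 7: 'h', 8: 'i', 9: 'j'}
--
--     while age > 0:
--         n = age % 10
--         answer += age_d[n]
--         age //= 10
--
--     return answer[::-1]
-- ===== SOURCE B (Python) =====
-- def solution(age):
--     if age <= 0:
--         return ''
--     return ''.join(chr(ord('a') + ord(c) - ord('0')) for c in str(age))
-- ===== Notes on version B (the rewrite author's own statement) =====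
-- stated objective: idiomatic
-- what changed: B converts the age to its decimal string once and maps each digit character to a letter in a single forward pass, instead of A's arithmetic digit extraction loop with a dict lookup followed by a final string reversal.
import Mathlib
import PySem

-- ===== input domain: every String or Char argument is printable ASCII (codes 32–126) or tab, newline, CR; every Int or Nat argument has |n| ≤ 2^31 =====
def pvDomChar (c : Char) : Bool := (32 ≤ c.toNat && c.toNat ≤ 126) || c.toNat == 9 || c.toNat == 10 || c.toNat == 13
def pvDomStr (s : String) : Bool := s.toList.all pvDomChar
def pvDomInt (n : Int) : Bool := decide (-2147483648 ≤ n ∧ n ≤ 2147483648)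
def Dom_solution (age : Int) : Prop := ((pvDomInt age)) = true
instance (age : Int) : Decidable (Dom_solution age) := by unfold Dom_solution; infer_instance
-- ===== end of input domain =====

-- B replaces A's arithmetic digit-extraction loop + final reversal by one forward pass over str(age) (idiomatic; same cost).

-- ===== PORT A =====
-- the dict age_d = {0:'a', …, 9:'j'}
def solutionDict : PySem.Dict Int Char :=
  PySem.Dict.ofList [(0,'a'),(1,'b'),(2,'c'),(3,'d'),(4,'e'),(5,'f'),(6,'g'),(7,'h'),(8,'i'),(9,'j')]

-- the while loop; age_d[n]: the key n = age % 10 is always 0..9 when the loop runs, so get? is always some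
def solutionLoop (age : Int) (answer : List Char) : List Char :=
  if _h : 0 < age then
    solutionLoop (PySem.Int.floordiv age 10)
      (answer ++ [(PySem.Dict.get? solutionDict (PySem.Int.mod age 10)).getD 'a'])
  else answer
termination_by age.toNat
decreasing_by
  have h10 : PySem.Int.floordiv age 10 = age / 10 := PySem.Int.floordiv_eq_ediv_of_pos (by omega)
  rw [h10]; omega

def solution (age : Int) : String :=
  String.ofList ((PySem.List.slice? (solutionLoop age []) none none (-1)).getD [])

-- ===== PORT B =====
def solution_alt (age : Int) : String :=
  if age ≤ 0 then ""
  else String.ofList ((PySem.Int.toChars age).map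
    (fun c => Char.ofNat ('a'.toNat + c.toNat - '0'.toNat)))

-- ===== PRECONDITION & SPEC =====
def Spec_solution (age : Int) (out : String) : Prop := out = solution_alt age
instance (age : Int) (out : String) : Decidable (Spec_solution age out) := by unfold Spec_solution; infer_instance

-- ===== CLAIM (what is proved, stated in full; the proofs are below) =====
def Claim_equal_solution : Prop := ∀ (age : Int), Dom_solution age → Spec_solution age (solution age)

-- ===== LEMMAS AND PROOFS =====

-- A's loop digits on the Nat side, LSB first, as digit characters
def lsbDigits : Nat → List Char
  | 0 => []
  | m + 1 => ((m + 1) % 10).digitChar :: lsbDigits ((m + 1) / 10)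
decreasing_by exact Nat.div_lt_self (Nat.succ_pos m) (by omega)

-- digit char → letter char, the translation both programs perform on each digit
def digitToLetter (c : Char) : Char := Char.ofNat ('a'.toNat + c.toNat - '0'.toNat)

lemma dict_eq_letter (d : Nat) (hd : d < 10) :
    (PySem.Dict.get? solutionDict ((d : Nat) : Int)).getD 'a' = digitToLetter d.digitChar := by
  interval_cases d <;> decide

lemma solutionLoop_eq (m : Nat) (acc : List Char) :
    solutionLoop (m : Int) acc = acc ++ (lsbDigits m).map digitToLetter := by
  induction m using Nat.strong_induction_on generalizing acc with
  | _ m ih =>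
    rw [solutionLoop]
    rcases Nat.eq_zero_or_pos m with hm | hm
    · subst hm; simp [lsbDigits]
    · have hpos : (0 : Int) < (m : Int) := by exact_mod_cast hm
      rw [dif_pos hpos]
      have hfd : PySem.Int.floordiv (m : Int) 10 = ((m / 10 : Nat) : Int) :=
        PySem.Int.floordiv_natCast m 10
      have hmd : PySem.Int.mod (m : Int) 10 = ((m % 10 : Nat) : Int) :=
        PySem.Int.mod_natCast m 10
      rw [hfd, hmd, dict_eq_letter (m % 10) (Nat.mod_lt _ (by omega)),
        ih (m / 10) (Nat.div_lt_self hm (by omega))]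
      obtain ⟨k, rfl⟩ := Nat.exists_eq_add_of_lt hm
      simp only [lsbDigits, List.map_cons, Nat.zero_add]
      simp

lemma solutionLoop_nonpos (age : Int) (h : age ≤ 0) (acc : List Char) :
    solutionLoop age acc = acc := by
  rw [solutionLoop, dif_neg (by omega)]

-- Nat.toDigits is the reverse of A's LSB-first digit list (for positive input)
lemma toDigitsCore_eq (m : Nat) (hm : 0 < m) :
    ∀ fuel ds, m ≤ fuel → Nat.toDigitsCore 10 fuel m ds = (lsbDigits m).reverse ++ ds := by
  induction m using Nat.strong_induction_on with
  | _ m ih =>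
    intro fuel ds hfuel
    obtain ⟨f, rfl⟩ : ∃ f, fuel = f + 1 := ⟨fuel - 1, by omega⟩
    obtain ⟨k, rfl⟩ := Nat.exists_eq_add_of_lt hm
    simp only [Nat.zero_add] at *
    rw [Nat.toDigitsCore]
    rcases Nat.eq_zero_or_pos ((k + 1) / 10) with hq | hq
    · rw [if_pos hq]
      simp [lsbDigits, hq]
    · rw [if_neg (by omega)]
      rw [ih ((k + 1) / 10) (Nat.div_lt_self (by omega) (by omega)) hq f _
        (by have := Nat.div_lt_self (Nat.succ_pos k) (show 1 < 10 by omega); omega)]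
      simp [lsbDigits]

lemma toDigits_eq (m : Nat) (hm : 0 < m) :
    Nat.toDigits 10 m = (lsbDigits m).reverse := by
  rw [Nat.toDigits, toDigitsCore_eq m hm (m + 1) [] (by omega), List.append_nil]

-- ===== VERDICT (by name: the statement is the Claim_ definition above) =====
theorem solution_spec : Claim_equal_solution := by
  intro age _
  unfold Spec_solution solution solution_alt
  by_cases h : age ≤ 0
  · rw [if_pos h, solutionLoop_nonpos age h []]
    simp [PySem.List.slice?_none_none_neg_one]
  · rw [if_neg h]
    obtain ⟨m, rfl⟩ : ∃ m : Nat, age = (m : Int) :=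
      ⟨age.toNat, (Int.toNat_of_nonneg (by omega)).symm⟩
    have hm : 0 < m := by exact_mod_cast (by omega : (0:Int) < (m:Int))
    rw [solutionLoop_eq m [], List.nil_append,
      PySem.List.slice?_none_none_neg_one, Option.getD_some]
    have htc : PySem.Int.toChars (m : Int) = Nat.toDigits 10 m := by
      unfold PySem.Int.toChars
      rw [if_neg (by omega)]
      simp
    rw [htc, toDigits_eq m hm, List.map_reverse]
    rfl
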